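-- pv_equiv track=rewrite | github.com/deepria/BAEKJOON_Py | CATEGORY/BFS/13565_침투.py | bfs
-- ===== SOURCE A (Python) =====
-- from collections import deque
--
-- def bfs(n, m, grid):
--     queue = deque()
--     visited = [[False] * m for _ in range(n)]
--
--     for j in range(m):
--         if grid[0][j] == 0:
--             queue.append((0, j))
--             visited[0][j] = True
--
--     directions = [(-1, 0), (1, 0), (0, -1), (0, 1)]
--
--     while queue:
--         x, y = queue.popleft()
--
--         if x == n - 1:
--             return "YES"
--
--         for dx, dy in directions:
--             nx, ny = x + dx, y + dy
--             if 0 <= nx < n and 0 <= ny < m and not visited[nx][ny] and grid[nx][ny] == 0: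
--                 queue.append((nx, ny))
--                 visited[nx][ny] = True
--
--     return "NO"
-- ===== SOURCE B (Python) =====
-- def bfs(n, m, grid):
--     if n <= 0 or m <= 0:
--         return "NO"
--     reach = [[i == 0 and grid[i][j] == 0 for j in range(m)] for i in range(n)]
--     changed = True
--     while changed:
--         changed = False
--         for i in range(n):
--             for j in range(m):
--                 if not reach[i][j] and grid[i][j] == 0:
--                     if ((i > 0 and reach[i - 1][j]) or (i + 1 < n and reach[i + 1][j])
--                             or (j > 0 and reach[i][j - 1]) or (j + 1 < m and reach[i][j + 1])):
--                         reach[i][j] = True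
--                         changed = True
--     return "YES" if any(reach[n - 1]) else "NO"
-- ===== Notes on version B (the rewrite author's own statement) =====
-- stated objective: alternative
-- what changed: Replaces the queue-based BFS (deque frontier, 4-direction expansion, early return on popping a bottom-row cell) with an in-place fixpoint flood fill: repeated full-grid relaxation passes that mark a cell open-and-adjacent-to-a-marked-cell until a pass changes nothing, then a single check of the bottom row.
-- outside the precondition, e.g. on bfs(2, 1, [[1], []]): A returns 'NO', B raises IndexError
import Mathlib
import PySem

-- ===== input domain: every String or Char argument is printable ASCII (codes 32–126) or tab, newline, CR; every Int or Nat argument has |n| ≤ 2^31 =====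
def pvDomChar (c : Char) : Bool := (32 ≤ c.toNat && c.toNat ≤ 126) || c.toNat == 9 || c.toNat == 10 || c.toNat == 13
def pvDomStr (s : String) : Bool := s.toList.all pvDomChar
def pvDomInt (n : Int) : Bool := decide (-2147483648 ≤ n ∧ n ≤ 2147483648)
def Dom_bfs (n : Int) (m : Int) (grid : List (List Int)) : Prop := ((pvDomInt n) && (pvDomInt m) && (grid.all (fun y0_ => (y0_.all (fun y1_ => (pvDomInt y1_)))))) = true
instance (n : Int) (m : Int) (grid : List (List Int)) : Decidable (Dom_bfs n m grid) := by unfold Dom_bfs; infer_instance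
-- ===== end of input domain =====

-- B replaces A's queue-based BFS by an in-place fixpoint flood fill (repeated relaxation
-- passes until no cell changes, then one look at the bottom row); same return value, not faster.

-- ===== PORT A =====
def pvGetI (grid : List (List Int)) (i j : Int) : Int :=
  (grid.getD i.toNat []).getD j.toNat 1

def pvGetB (v : List (List Bool)) (i j : Int) : Bool :=
  (v.getD i.toNat []).getD j.toNat true

def pvSetB (v : List (List Bool)) (i j : Int) : List (List Bool) :=
  v.set i.toNat ((v.getD i.toNat []).set j.toNat true)

def pvFalseCount (v : List (List Bool)) : Nat :=
  (v.map (fun row => row.count false)).sum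

theorem pv_count_row (l : List Bool) (b : Nat) (h : l.getD b true = false) :
    (l.set b true).count false + 1 = l.count false := by
  induction l generalizing b with
  | nil => simp [List.getD] at h
  | cons hd tl ih =>
    cases b with
    | zero => simp_all [List.getD]
    | succ b =>
      have := ih b (by simpa [List.getD] using h)
      simp only [List.set, List.count_cons]
      omega

theorem pv_sum_set (l : List Nat) (i : Nat) (a : Nat) (h : i < l.length) :
    (l.set i a).sum + l[i] = l.sum + a := by
  induction l generalizing i with
  | nil => simp at h
  | cons hd tl ih =>
    cases i with
    | zero => simp [List.set]; omega
    | succ i =>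
      have := ih i (by simpa using h)
      simp only [List.set, List.sum_cons, List.getElem_cons_succ]
      omega

theorem pvGetB_false_range (v : List (List Bool)) (i j : Int)
    (h : pvGetB v i j = false) :
    i.toNat < v.length ∧ j.toNat < (v.getD i.toNat []).length := by
  unfold pvGetB at h
  simp only [List.getD_eq_getElem?_getD] at h
  by_cases hi : i.toNat < v.length
  · refine ⟨hi, ?_⟩
    by_cases hj : j.toNat < (v.getD i.toNat []).length
    · exact hj
    · exfalso
      rw [List.getElem?_eq_none (by simp [List.getD_eq_getElem?_getD] at hj ⊢; omega)] at h
      simp at h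
  · exfalso
    rw [show v[i.toNat]? = none from List.getElem?_eq_none (by omega)] at h
    simp at h

theorem pvFalseCount_setB (v : List (List Bool)) (i j : Int)
    (h : pvGetB v i j = false) :
    pvFalseCount (pvSetB v i j) + 1 = pvFalseCount v := by
  obtain ⟨hi, hj⟩ := pvGetB_false_range v i j h
  have hg : v.getD i.toNat [] = v[i.toNat] := List.getD_eq_getElem _ _ hi
  have hrow : v[i.toNat].getD j.toNat true = false := by
    unfold pvGetB at h; rw [hg] at h; exact h
  have hcnt := pv_count_row v[i.toNat] j.toNat hrow
  unfold pvSetB pvFalseCount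
  rw [hg, List.map_set]
  have hs := pv_sum_set (v.map (fun row => row.count false)) i.toNat
      ((v[i.toNat].set j.toNat true).count false) (by simpa using hi)
  rw [List.getElem_map] at hs
  omega

def pvDirs : List (Int × Int) := [(-1, 0), (1, 0), (0, -1), (0, 1)]

def pvStep (n m : Int) (grid : List (List Int)) (x y : Int)
    (s : List (Int × Int) × List (List Bool)) (d : Int × Int) :
    List (Int × Int) × List (List Bool) :=
  if 0 ≤ x + d.1 ∧ x + d.1 < n ∧ 0 ≤ y + d.2 ∧ y + d.2 < m ∧
      pvGetB s.2 (x + d.1) (y + d.2) = false ∧ pvGetI grid (x + d.1) (y + d.2) = 0 then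
    (s.1 ++ [(x + d.1, y + d.2)], pvSetB s.2 (x + d.1) (y + d.2))
  else s

theorem pvStep_mu (n m : Int) (grid : List (List Int)) (x y : Int)
    (s : List (Int × Int) × List (List Bool)) (d : Int × Int) :
    2 * pvFalseCount (pvStep n m grid x y s d).2 + (pvStep n m grid x y s d).1.length ≤
      2 * pvFalseCount s.2 + s.1.length := by
  unfold pvStep
  split
  · rename_i hcond
    have := pvFalseCount_setB s.2 (x + d.1) (y + d.2) hcond.2.2.2.2.1
    simp only [List.length_append, List.length_cons, List.length_nil]
    omega
  · exact le_refl _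

theorem pvFold_mu (n m : Int) (grid : List (List Int)) (x y : Int)
    (ds : List (Int × Int)) (s : List (Int × Int) × List (List Bool)) :
    2 * pvFalseCount (ds.foldl (pvStep n m grid x y) s).2 +
        (ds.foldl (pvStep n m grid x y) s).1.length ≤
      2 * pvFalseCount s.2 + s.1.length := by
  induction ds generalizing s with
  | nil => simp
  | cons d ds ih =>
    simp only [List.foldl_cons]
    exact le_trans (ih (pvStep n m grid x y s d)) (pvStep_mu n m grid x y s d)

def pvLoop (n m : Int) (grid : List (List Int)) :
    List (Int × Int) × List (List Bool) → String
  | ([], _) => "NO"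
  | ((x, y) :: rest, v) =>
    if x = n - 1 then "YES"
    else pvLoop n m grid (pvDirs.foldl (pvStep n m grid x y) (rest, v))
termination_by s => 2 * pvFalseCount s.2 + s.1.length
decreasing_by
  have := pvFold_mu n m grid x y pvDirs (rest, v)
  dsimp only at this
  simp only [List.length_cons]
  omega

def bfs (n : Int) (m : Int) (grid : List (List Int)) : String :=
  pvLoop n m grid
    ((PySem.List.pyRange 0 m 1).foldl
      (fun s j =>
        if pvGetI grid 0 j = 0 then (s.1 ++ [((0 : Int), j)], pvSetB s.2 0 j) else s)
      ([], List.replicate n.toNat (List.replicate m.toNat false)))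


-- ===== PORT B =====
def pvInit (n m : Int) (grid : List (List Int)) : List (List Bool) :=
  (PySem.List.pyRange 0 n 1).map (fun i =>
    (PySem.List.pyRange 0 m 1).map (fun j => (i == 0) && (pvGetI grid i j == 0)))

def pvNbr (n m : Int) (r : List (List Bool)) (i j : Int) : Bool :=
  (decide (0 < i) && pvGetB r (i - 1) j) || (decide (i + 1 < n) && pvGetB r (i + 1) j) ||
  (decide (0 < j) && pvGetB r i (j - 1)) || (decide (j + 1 < m) && pvGetB r i (j + 1))

def pvCell (n m : Int) (grid : List (List Int))
    (s : List (List Bool) × Bool) (c : Int × Int) : List (List Bool) × Bool :=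
  if pvGetB s.1 c.1 c.2 = false ∧ pvGetI grid c.1 c.2 = 0 ∧ pvNbr n m s.1 c.1 c.2 = true then
    (pvSetB s.1 c.1 c.2, true)
  else s

def pvCells (n m : Int) : List (Int × Int) :=
  (PySem.List.pyRange 0 n 1).flatMap (fun i =>
    (PySem.List.pyRange 0 m 1).map (fun j => (i, j)))

theorem pvCell_fc (n m : Int) (grid : List (List Int))
    (s : List (List Bool) × Bool) (c : Int × Int) :
    (pvFalseCount (pvCell n m grid s c).1 ≤ pvFalseCount s.1) ∧
      ((pvCell n m grid s c).2 = s.2 ∨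
        pvFalseCount (pvCell n m grid s c).1 < pvFalseCount s.1) := by
  unfold pvCell
  split
  · rename_i hcond
    have := pvFalseCount_setB s.1 c.1 c.2 hcond.1
    dsimp only
    exact ⟨by omega, Or.inr (by omega)⟩
  · exact ⟨le_refl _, Or.inl rfl⟩

theorem pvPass_fc (n m : Int) (grid : List (List Int)) (cs : List (Int × Int))
    (s : List (List Bool) × Bool) :
    (pvFalseCount ((cs.foldl (pvCell n m grid) s)).1 ≤ pvFalseCount s.1) ∧
      (((cs.foldl (pvCell n m grid) s)).2 = s.2 ∨
        pvFalseCount ((cs.foldl (pvCell n m grid) s)).1 < pvFalseCount s.1) := by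
  induction cs generalizing s with
  | nil => exact ⟨le_refl _, Or.inl rfl⟩
  | cons c cs ih =>
    simp only [List.foldl_cons]
    obtain ⟨h1, h2⟩ := pvCell_fc n m grid s c
    obtain ⟨h3, h4⟩ := ih (pvCell n m grid s c)
    refine ⟨le_trans h3 h1, ?_⟩
    rcases h4 with h4 | h4
    · rcases h2 with h2 | h2
      · exact Or.inl (h4.trans h2)
      · exact Or.inr (lt_of_le_of_lt h3 h2)
    · exact Or.inr (lt_of_lt_of_le h4 h1)

def pvPassLoop (n m : Int) (grid : List (List Int)) (r : List (List Bool)) :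
    List (List Bool) :=
  let s := (pvCells n m).foldl (pvCell n m grid) (r, false)
  if h : s.2 = true then pvPassLoop n m grid s.1 else s.1
termination_by pvFalseCount r
decreasing_by
  have := pvPass_fc n m grid (pvCells n m) (r, false)
  dsimp only at this
  rcases this.2 with h2 | h2
  · rw [h] at h2; simp at h2
  · exact h2

def bfs_alt (n : Int) (m : Int) (grid : List (List Int)) : String :=
  if n ≤ 0 ∨ m ≤ 0 then "NO"
  else
    if ((pvPassLoop n m grid (pvInit n m grid)).getD (n - 1).toNat []).any (fun b => b) then
      "YES"
    else "NO"

-- ===== PRECONDITION & SPEC =====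
-- Pre_bfs excludes inputs where A raises an IndexError (m > 0 with a missing or too-short
-- row among the first n, or n ≤ 0 with an open top-row cell) and, of the inputs where A
-- still returns, only those whose undersized rows A happens never to index because the
-- flood cannot reach them; B naturally raises there, so they lie outside Pre_.
def Pre_bfs (n : Int) (m : Int) (grid : List (List Int)) : Prop :=
  m ≤ 0 ∨ (1 ≤ n ∧ n.toNat ≤ grid.length ∧
    ∀ row ∈ grid.take n.toNat, m.toNat ≤ row.length) ∨
  (n ≤ 0 ∧ 1 ≤ m ∧ m.toNat ≤ (grid.getD 0 []).length ∧
    ∀ x ∈ (grid.getD 0 []).take m.toNat, ¬x = 0)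

instance (n : Int) (m : Int) (grid : List (List Int)) : Decidable (Pre_bfs n m grid) := by
  unfold Pre_bfs; infer_instance

def pvWitness_bfs : Int × Int × List (List Int) := (2, 2, [[0, 1], [0, 1]])

def Spec_bfs (n : Int) (m : Int) (grid : List (List Int)) (out : String) : Prop := out = bfs_alt n m grid
instance (n : Int) (m : Int) (grid : List (List Int)) (out : String) : Decidable (Spec_bfs n m grid out) := by unfold Spec_bfs; infer_instance

-- ===== CLAIM (what is proved, stated in full; the proofs are below) =====
def Claim_equal_bfs : Prop := ∀ (n : Int) (m : Int) (grid : List (List Int)), Dom_bfs n m grid → Pre_bfs n m grid → Spec_bfs n m grid (bfs n m grid)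

-- ===== LEMMAS AND PROOFS =====
-- row-level helpers
theorem pv_row_set_self (l : List Bool) (b : Nat) : (l.set b true).getD b true = true := by
  by_cases h : b < l.length
  · rw [List.getD_eq_getElem _ _ (by simpa using h)]
    exact List.getElem_set_self (by simpa using h)
  · rw [List.getD_eq_default _ _ (by simp; omega)]

theorem pv_row_set_ne (l : List Bool) (b c : Nat) (h : b ≠ c) :
    (l.set b true).getD c true = l.getD c true := by
  simp only [List.getD_eq_getElem?_getD]
  rw [List.getElem?_set_ne h]

theorem pvGetB_setB_self (v : List (List Bool)) (i j : Int) :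
    pvGetB (pvSetB v i j) i j = true := by
  unfold pvGetB pvSetB
  by_cases h : i.toNat < v.length
  · have h2 : i.toNat < (v.set i.toNat ((v.getD i.toNat []).set j.toNat true)).length := by
      simpa using h
    rw [List.getD_eq_getElem _ _ h2, List.getElem_set_self h2]
    exact pv_row_set_self _ _
  · have he : v.getD i.toNat [] = [] := List.getD_eq_default v [] (by omega)
    rw [List.set_eq_of_length_le (by omega), he]
    simp [List.getD]

theorem pvGetB_setB_ne (v : List (List Bool)) (i j p q : Int)
    (h : ¬(p.toNat = i.toNat ∧ q.toNat = j.toNat)) :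
    pvGetB (pvSetB v i j) p q = pvGetB v p q := by
  unfold pvGetB pvSetB
  by_cases hp : p.toNat = i.toNat
  · have hq : q.toNat ≠ j.toNat := fun hq => h ⟨hp, hq⟩
    rw [← hp]
    by_cases hi : p.toNat < v.length
    · have h2 : p.toNat < (v.set p.toNat ((v.getD p.toNat []).set j.toNat true)).length := by
        simpa using hi
      rw [List.getD_eq_getElem _ _ h2, List.getElem_set_self h2, List.getD_eq_getElem _ _ hi]
      exact pv_row_set_ne _ _ _ (fun e => hq e.symm)
    · rw [List.set_eq_of_length_le (by omega)]
  · simp only [List.getD_eq_getElem?_getD]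
    rw [List.getElem?_set_ne (fun e => hp e.symm)]

theorem pvGetB_setB_mono (v : List (List Bool)) (i j p q : Int)
    (h : pvGetB v p q = true) : pvGetB (pvSetB v i j) p q = true := by
  by_cases hc : p.toNat = i.toNat ∧ q.toNat = j.toNat
  · have : pvSetB v i j = pvSetB v p q := by unfold pvSetB; rw [hc.1, hc.2]
    rw [this]; exact pvGetB_setB_self v p q
  · rw [pvGetB_setB_ne v i j p q hc]; exact h

theorem pvGetB_setB_cases (v : List (List Bool)) (i j p q : Int)
    (h : pvGetB (pvSetB v i j) p q = true) :
    pvGetB v p q = true ∨ (p.toNat = i.toNat ∧ q.toNat = j.toNat) := by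
  by_cases hc : p.toNat = i.toNat ∧ q.toNat = j.toNat
  · exact Or.inr hc
  · rw [pvGetB_setB_ne v i j p q hc] at h; exact Or.inl h

def pvInRange (n m x y : Int) : Prop := 0 ≤ x ∧ x < n ∧ 0 ≤ y ∧ y < m

def pvAdj (x y x' y' : Int) : Prop :=
  (x' = x - 1 ∧ y' = y) ∨ (x' = x + 1 ∧ y' = y) ∨ (x' = x ∧ y' = y - 1) ∨ (x' = x ∧ y' = y + 1)

inductive PvReach (n m : Int) (grid : List (List Int)) : Int → Int → Prop where
  | seed (j : Int) (h0 : 0 ≤ j) (h1 : j < m) (hg : pvGetI grid 0 j = 0) : PvReach n m grid 0 j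
  | step (x y x' y' : Int) (hr : PvReach n m grid x y) (hadj : pvAdj x y x' y')
      (hin : pvInRange n m x' y') (hg : pvGetI grid x' y' = 0) : PvReach n m grid x' y'

theorem pvReach_range (n m : Int) (grid : List (List Int)) (hn : 1 ≤ n) (x y : Int)
    (h : PvReach n m grid x y) : pvInRange n m x y := by
  induction h with
  | seed j h0 h1 hg => exact ⟨le_refl 0, by omega, h0, h1⟩
  | step x y x' y' hr hadj hin hg ih => exact hin

theorem pvDirs_adj (x y : Int) : ∀ d ∈ pvDirs, pvAdj x y (x + d.1) (y + d.2) := by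
  intro d hd
  simp only [pvDirs, List.mem_cons] at hd
  rcases hd with rfl | rfl | rfl | rfl | h
  · exact Or.inl ⟨by ring, by ring⟩
  · exact Or.inr (Or.inl ⟨by ring, by ring⟩)
  · exact Or.inr (Or.inr (Or.inl ⟨by ring, by ring⟩))
  · exact Or.inr (Or.inr (Or.inr ⟨by ring, by ring⟩))
  · simp at h

theorem pvAdj_dir (x y x' y' : Int) (h : pvAdj x y x' y') :
    ∃ d ∈ pvDirs, x' = x + d.1 ∧ y' = y + d.2 := by
  rcases h with ⟨h1, h2⟩ | ⟨h1, h2⟩ | ⟨h1, h2⟩ | ⟨h1, h2⟩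
  · exact ⟨(-1, 0), by simp [pvDirs], by omega, by omega⟩
  · exact ⟨(1, 0), by simp [pvDirs], by omega, by omega⟩
  · exact ⟨(0, -1), by simp [pvDirs], by omega, by omega⟩
  · exact ⟨(0, 1), by simp [pvDirs], by omega, by omega⟩

theorem pvStep_pos (n m : Int) (grid : List (List Int)) (x y : Int)
    (s : List (Int × Int) × List (List Bool)) (d : Int × Int)
    (h : 0 ≤ x + d.1 ∧ x + d.1 < n ∧ 0 ≤ y + d.2 ∧ y + d.2 < m ∧
      pvGetB s.2 (x + d.1) (y + d.2) = false ∧ pvGetI grid (x + d.1) (y + d.2) = 0) :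
    pvStep n m grid x y s d = (s.1 ++ [(x + d.1, y + d.2)], pvSetB s.2 (x + d.1) (y + d.2)) := by
  simp [pvStep, h]

theorem pvStep_neg (n m : Int) (grid : List (List Int)) (x y : Int)
    (s : List (Int × Int) × List (List Bool)) (d : Int × Int)
    (h : ¬(0 ≤ x + d.1 ∧ x + d.1 < n ∧ 0 ≤ y + d.2 ∧ y + d.2 < m ∧
      pvGetB s.2 (x + d.1) (y + d.2) = false ∧ pvGetI grid (x + d.1) (y + d.2) = 0)) :
    pvStep n m grid x y s d = s := by
  simp only [pvStep, if_neg h]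

theorem pvFold_spec (n m : Int) (grid : List (List Int)) (x y : Int)
    (hxy : PvReach n m grid x y) :
    ∀ (ds : List (Int × Int)), (∀ d ∈ ds, pvAdj x y (x + d.1) (y + d.2)) →
    ∀ (q : List (Int × Int)) (v : List (List Bool)),
    (∀ c ∈ (ds.foldl (pvStep n m grid x y) (q, v)).1, c ∈ q ∨
        (pvInRange n m c.1 c.2 ∧ PvReach n m grid c.1 c.2 ∧
          pvGetB (ds.foldl (pvStep n m grid x y) (q, v)).2 c.1 c.2 = true)) ∧
    (∀ c ∈ q, c ∈ (ds.foldl (pvStep n m grid x y) (q, v)).1) ∧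
    (∀ p r : Int, pvGetB v p r = true → pvGetB (ds.foldl (pvStep n m grid x y) (q, v)).2 p r = true) ∧
    (∀ p r : Int, 0 ≤ p → 0 ≤ r → pvGetB (ds.foldl (pvStep n m grid x y) (q, v)).2 p r = true →
        pvGetB v p r = true ∨ (p, r) ∈ (ds.foldl (pvStep n m grid x y) (q, v)).1) ∧
    (∀ d ∈ ds, pvInRange n m (x + d.1) (y + d.2) → pvGetI grid (x + d.1) (y + d.2) = 0 →
        pvGetB (ds.foldl (pvStep n m grid x y) (q, v)).2 (x + d.1) (y + d.2) = true) := by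
  intro ds
  induction ds with
  | nil =>
    intro _ q v
    refine ⟨fun c hc => Or.inl hc, fun c hc => hc, fun p r h => h,
      fun p r _ _ h => Or.inl h, fun d hd => absurd hd (List.not_mem_nil)⟩
  | cons d ds ih =>
    intro hadj q v
    have hadjd : pvAdj x y (x + d.1) (y + d.2) := hadj d List.mem_cons_self
    have hadjds : ∀ d' ∈ ds, pvAdj x y (x + d'.1) (y + d'.2) :=
      fun d' hd' => hadj d' (List.mem_cons_of_mem d hd')
    by_cases hc : 0 ≤ x + d.1 ∧ x + d.1 < n ∧ 0 ≤ y + d.2 ∧ y + d.2 < m ∧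
        pvGetB v (x + d.1) (y + d.2) = false ∧ pvGetI grid (x + d.1) (y + d.2) = 0
    · -- push case
      have hstep := pvStep_pos n m grid x y (q, v) d hc
      have hreach : PvReach n m grid (x + d.1) (y + d.2) :=
        PvReach.step x y _ _ hxy hadjd ⟨hc.1, hc.2.1, hc.2.2.1, hc.2.2.2.1⟩ hc.2.2.2.2.2
      obtain ⟨O1, O2, O3, O4, O5⟩ := ih hadjds (q ++ [(x + d.1, y + d.2)]) (pvSetB v (x + d.1) (y + d.2))
      simp only [List.foldl_cons, hstep]
      refine ⟨?_, ?_, ?_, ?_, ?_⟩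
      · intro c hcmem
        rcases O1 c hcmem with hq | hgood
        · rcases List.mem_append.mp hq with hq | hq
          · exact Or.inl hq
          · simp only [List.mem_singleton] at hq
            subst hq
            exact Or.inr ⟨⟨hc.1, hc.2.1, hc.2.2.1, hc.2.2.2.1⟩, hreach,
              O3 _ _ (pvGetB_setB_self v _ _)⟩
        · exact Or.inr hgood
      · intro c hcmem
        exact O2 c (List.mem_append.mpr (Or.inl hcmem))
      · intro p r h
        exact O3 p r (pvGetB_setB_mono v _ _ p r h)
      · intro p r hp hr h
        rcases O4 p r hp hr h with h2 | h2
        · rcases pvGetB_setB_cases v _ _ p r h2 with h3 | h3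
          · exact Or.inl h3
          · have : (p, r) = (x + d.1, y + d.2) := by
              have := h3.1; have := h3.2
              have : p = x + d.1 := by omega
              have : r = y + d.2 := by omega
              simp_all
            rw [this]
            exact Or.inr (O2 _ (List.mem_append.mpr (Or.inr (List.mem_singleton_self _))))
        · exact Or.inr h2
      · intro d' hd' hin hg
        rcases List.mem_cons.mp hd' with rfl | hd'
        · exact O3 _ _ (pvGetB_setB_self v _ _)
        · exact O5 d' hd' hin hg
    · -- no-push case
      have hstep := pvStep_neg n m grid x y (q, v) d hc
      obtain ⟨O1, O2, O3, O4, O5⟩ := ih hadjds q v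
      simp only [List.foldl_cons, hstep]
      refine ⟨O1, O2, O3, O4, ?_⟩
      intro d' hd' hin hg
      rcases List.mem_cons.mp hd' with rfl | hd'
      · have hvis : pvGetB v (x + d'.1) (y + d'.2) = true := by
          rcases Bool.eq_false_or_eq_true (pvGetB v (x + d'.1) (y + d'.2)) with ht | hf
          · exact ht
          · exact absurd ⟨hin.1, hin.2.1, hin.2.2.1, hin.2.2.2, hf, hg⟩ hc
        exact O3 _ _ hvis
      · exact O5 d' hd' hin hg

def pvInvA (n m : Int) (grid : List (List Int)) (q : List (Int × Int))
    (v : List (List Bool)) : Prop :=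
  (∀ c ∈ q, pvInRange n m c.1 c.2 ∧ PvReach n m grid c.1 c.2 ∧ pvGetB v c.1 c.2 = true) ∧
  (∀ x y : Int, pvInRange n m x y → pvGetB v x y = true → PvReach n m grid x y) ∧
  (∀ j : Int, 0 ≤ j → j < m → pvGetI grid 0 j = 0 → pvGetB v 0 j = true) ∧
  (∀ x y : Int, pvInRange n m x y → pvGetB v x y = true → (x, y) ∈ q ∨
    (x ≠ n - 1 ∧ ∀ x' y' : Int, pvAdj x y x' y' → pvInRange n m x' y' →
      pvGetI grid x' y' = 0 → pvGetB v x' y' = true))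

theorem pvInvA_step (n m : Int) (grid : List (List Int)) (x y : Int)
    (rest : List (Int × Int)) (v : List (List Bool))
    (hinv : pvInvA n m grid ((x, y) :: rest) v) (hx : x ≠ n - 1) :
    pvInvA n m grid (pvDirs.foldl (pvStep n m grid x y) (rest, v)).1
      (pvDirs.foldl (pvStep n m grid x y) (rest, v)).2 := by
  obtain ⟨hQ, hV, hS, hP⟩ := hinv
  obtain ⟨hinR, hR, hM⟩ := hQ (x, y) List.mem_cons_self
  obtain ⟨O1, O2, O3, O4, O5⟩ := pvFold_spec n m grid x y hR pvDirs (pvDirs_adj x y) rest v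
  refine ⟨?_, ?_, ?_, ?_⟩
  · intro c hc
    rcases O1 c hc with hq | hgood
    · obtain ⟨r1, r2, r3⟩ := hQ c (List.mem_cons_of_mem _ hq)
      exact ⟨r1, r2, O3 _ _ r3⟩
    · exact ⟨hgood.1, hgood.2.1, hgood.2.2⟩
  · intro p r hin ht
    rcases O4 p r hin.1 hin.2.2.1 ht with hv | hf
    · exact hV p r hin hv
    · rcases O1 (p, r) hf with hq | hgood
      · exact (hQ (p, r) (List.mem_cons_of_mem _ hq)).2.1
      · exact hgood.2.1
  · intro j h0 h1 hg
    exact O3 _ _ (hS j h0 h1 hg)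
  · intro p r hin ht
    rcases O4 p r hin.1 hin.2.2.1 ht with hv | hf
    · rcases hP p r hin hv with hq | hproc
      · rcases List.mem_cons.mp hq with heq | hq
        · have hpx : p = x := by injection heq with h1 h2
          have hry : r = y := by injection heq with h1 h2
          subst hpx; subst hry
          refine Or.inr ⟨hx, ?_⟩
          intro x' y' hadj hin' hg'
          obtain ⟨d, hd, hx', hy'⟩ := pvAdj_dir p r x' y' hadj
          rw [hx', hy']
          exact O5 d hd (by rw [← hx', ← hy']; exact hin') (by rw [← hx', ← hy']; exact hg')
        · exact Or.inl (O2 _ hq)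
      · refine Or.inr ⟨hproc.1, ?_⟩
        intro x' y' hadj hin' hg'
        exact O3 _ _ (hproc.2 x' y' hadj hin' hg')
    · exact Or.inl hf

theorem pvReach_visited (n m : Int) (grid : List (List Int)) (hn : 1 ≤ n)
    (v : List (List Bool))
    (hS : ∀ j : Int, 0 ≤ j → j < m → pvGetI grid 0 j = 0 → pvGetB v 0 j = true)
    (hC : ∀ x y : Int, pvInRange n m x y → pvGetB v x y = true →
      ∀ x' y' : Int, pvAdj x y x' y' → pvInRange n m x' y' → pvGetI grid x' y' = 0 →
        pvGetB v x' y' = true)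
    (x y : Int) (h : PvReach n m grid x y) : pvGetB v x y = true := by
  induction h with
  | seed j h0 h1 hg => exact hS j h0 h1 hg
  | step a b a' b' hr hadj hin hg ih =>
    exact hC a b (pvReach_range n m grid hn a b hr) ih a' b' hadj hin hg

theorem pvLoop_yes (n m : Int) (grid : List (List Int)) (hn : 1 ≤ n) :
    ∀ s : List (Int × Int) × List (List Bool), pvInvA n m grid s.1 s.2 →
      (pvLoop n m grid s = "YES" ↔
        ∃ j : Int, 0 ≤ j ∧ j < m ∧ PvReach n m grid (n - 1) j) := by
  intro s
  induction s using pvLoop.induct n m grid with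
  | case1 v =>
    intro hinv
    rw [pvLoop]
    constructor
    · intro h; simp at h
    · rintro ⟨j, h0, h1, hr⟩
      exfalso
      obtain ⟨hQ, hV, hS, hP⟩ := hinv
      have hC : ∀ x y : Int, pvInRange n m x y → pvGetB v x y = true →
          ∀ x' y' : Int, pvAdj x y x' y' → pvInRange n m x' y' → pvGetI grid x' y' = 0 →
            pvGetB v x' y' = true := by
        intro x y hin ht x' y' hadj hin' hg'
        rcases hP x y hin ht with hq | hproc
        · simp at hq
        · exact hproc.2 x' y' hadj hin' hg'
      have hvis := pvReach_visited n m grid hn v hS hC (n - 1) j hr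
      rcases hP (n - 1) j ⟨by omega, by omega, h0, h1⟩ hvis with hq | hproc
      · simp at hq
      · exact hproc.1 rfl
  | case2 y rest v =>
    intro hinv
    rw [pvLoop]
    simp only [if_pos rfl]
    constructor
    · intro _
      obtain ⟨hin, hr, _⟩ := hinv.1 (n - 1, y) List.mem_cons_self
      exact ⟨y, hin.2.2.1, hin.2.2.2, hr⟩
    · intro _; rfl
  | case3 x y rest v hx ih =>
    intro hinv
    rw [pvLoop]
    simp only [if_neg hx]
    exact ih (pvInvA_step n m grid x y rest v hinv hx)

theorem pvSeed_spec (n m : Int) (grid : List (List Int)) :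
    ∀ (js : List Int), (∀ j ∈ js, 0 ≤ j) → ∀ (q : List (Int × Int)) (v : List (List Bool)),
    (∀ c ∈ (js.foldl (fun s j =>
        if pvGetI grid 0 j = 0 then (s.1 ++ [((0 : Int), j)], pvSetB s.2 0 j) else s) (q, v)).1,
      c ∈ q ∨ (c.1 = 0 ∧ c.2 ∈ js ∧ pvGetI grid 0 c.2 = 0 ∧
        pvGetB (js.foldl (fun s j =>
          if pvGetI grid 0 j = 0 then (s.1 ++ [((0 : Int), j)], pvSetB s.2 0 j) else s) (q, v)).2
          c.1 c.2 = true)) ∧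
    (∀ c ∈ q, c ∈ (js.foldl (fun s j =>
        if pvGetI grid 0 j = 0 then (s.1 ++ [((0 : Int), j)], pvSetB s.2 0 j) else s) (q, v)).1) ∧
    (∀ p r : Int, pvGetB v p r = true → pvGetB (js.foldl (fun s j =>
        if pvGetI grid 0 j = 0 then (s.1 ++ [((0 : Int), j)], pvSetB s.2 0 j) else s) (q, v)).2
        p r = true) ∧
    (∀ p r : Int, 0 ≤ p → 0 ≤ r → pvGetB (js.foldl (fun s j =>
        if pvGetI grid 0 j = 0 then (s.1 ++ [((0 : Int), j)], pvSetB s.2 0 j) else s) (q, v)).2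
        p r = true → pvGetB v p r = true ∨ (p, r) ∈ (js.foldl (fun s j =>
        if pvGetI grid 0 j = 0 then (s.1 ++ [((0 : Int), j)], pvSetB s.2 0 j) else s) (q, v)).1) ∧
    (∀ j ∈ js, pvGetI grid 0 j = 0 → pvGetB (js.foldl (fun s j =>
        if pvGetI grid 0 j = 0 then (s.1 ++ [((0 : Int), j)], pvSetB s.2 0 j) else s) (q, v)).2
        0 j = true) := by
  intro js
  induction js with
  | nil =>
    intro _ q v
    exact ⟨fun c hc => Or.inl hc, fun c hc => hc, fun p r h => h,
      fun p r _ _ h => Or.inl h, fun j hj => absurd hj (List.not_mem_nil)⟩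
  | cons j js ih =>
    intro hjs q v
    have hj0 : 0 ≤ j := hjs j List.mem_cons_self
    have hjs' : ∀ j' ∈ js, 0 ≤ j' := fun j' hj' => hjs j' (List.mem_cons_of_mem j hj')
    by_cases hg : pvGetI grid 0 j = 0
    · obtain ⟨O1, O2, O3, O4, O5⟩ := ih hjs' (q ++ [((0 : Int), j)]) (pvSetB v 0 j)
      simp only [List.foldl_cons, if_pos hg]
      refine ⟨?_, ?_, ?_, ?_, ?_⟩
      · intro c hc
        rcases O1 c hc with hq | hgood
        · rcases List.mem_append.mp hq with hq | hq
          · exact Or.inl hq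
          · simp only [List.mem_singleton] at hq
            subst hq
            exact Or.inr ⟨rfl, List.mem_cons_self, hg, O3 _ _ (pvGetB_setB_self v _ _)⟩
        · exact Or.inr ⟨hgood.1, List.mem_cons_of_mem j hgood.2.1, hgood.2.2⟩
      · intro c hc
        exact O2 c (List.mem_append.mpr (Or.inl hc))
      · intro p r h
        exact O3 p r (pvGetB_setB_mono v _ _ p r h)
      · intro p r hp hr h
        rcases O4 p r hp hr h with h2 | h2
        · rcases pvGetB_setB_cases v _ _ p r h2 with h3 | h3
          · exact Or.inl h3
          · have heq : (p, r) = ((0 : Int), j) := by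
              have h4 := h3.1; have h5 := h3.2
              have : p = 0 := by omega
              have : r = j := by omega
              simp_all
            rw [heq]
            exact Or.inr (O2 _ (List.mem_append.mpr (Or.inr (List.mem_singleton_self _))))
        · exact Or.inr h2
      · intro j' hj' hg'
        rcases List.mem_cons.mp hj' with rfl | hj'
        · exact O3 _ _ (pvGetB_setB_self v _ _)
        · exact O5 j' hj' hg'
    · obtain ⟨O1, O2, O3, O4, O5⟩ := ih hjs' q v
      simp only [List.foldl_cons, if_neg hg]
      refine ⟨?_, O2, O3, O4, ?_⟩
      · intro c hc
        rcases O1 c hc with hq | hgood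
        · exact Or.inl hq
        · exact Or.inr ⟨hgood.1, List.mem_cons_of_mem j hgood.2.1, hgood.2.2⟩
      · intro j' hj' hg'
        rcases List.mem_cons.mp hj' with rfl | hj'
        · exact absurd hg' hg
        · exact O5 j' hj' hg'

theorem pvGetB_replicate (n m p r : Int) (hin : pvInRange n m p r) :
    pvGetB (List.replicate n.toNat (List.replicate m.toNat false)) p r = false := by
  obtain ⟨h1, h2, h3, h4⟩ := hin
  unfold pvGetB
  have ha : p.toNat < (List.replicate n.toNat (List.replicate m.toNat false)).length := by
    simp; omega
  rw [List.getD_eq_getElem _ _ ha, List.getElem_replicate]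
  have hb : r.toNat < (List.replicate m.toNat false).length := by simp; omega
  rw [List.getD_eq_getElem _ _ hb, List.getElem_replicate]

theorem pvInvA_init (n m : Int) (grid : List (List Int)) (hn : 1 ≤ n) :
    pvInvA n m grid
      ((PySem.List.pyRange 0 m 1).foldl (fun s j =>
        if pvGetI grid 0 j = 0 then (s.1 ++ [((0 : Int), j)], pvSetB s.2 0 j) else s)
        ([], List.replicate n.toNat (List.replicate m.toNat false))).1
      ((PySem.List.pyRange 0 m 1).foldl (fun s j =>
        if pvGetI grid 0 j = 0 then (s.1 ++ [((0 : Int), j)], pvSetB s.2 0 j) else s)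
        ([], List.replicate n.toNat (List.replicate m.toNat false))).2 := by
  have hjs : ∀ j ∈ PySem.List.pyRange 0 m 1, (0 : Int) ≤ j := by
    intro j hj
    exact ((PySem.List.mem_pyRange_one).mp hj).1
  obtain ⟨O1, O2, O3, O4, O5⟩ := pvSeed_spec n m grid (PySem.List.pyRange 0 m 1) hjs []
    (List.replicate n.toNat (List.replicate m.toNat false))
  have hmemgood : ∀ c ∈ ((PySem.List.pyRange 0 m 1).foldl (fun s j =>
      if pvGetI grid 0 j = 0 then (s.1 ++ [((0 : Int), j)], pvSetB s.2 0 j) else s)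
      ([], List.replicate n.toNat (List.replicate m.toNat false))).1,
      pvInRange n m c.1 c.2 ∧ PvReach n m grid c.1 c.2 ∧
        pvGetB ((PySem.List.pyRange 0 m 1).foldl (fun s j =>
          if pvGetI grid 0 j = 0 then (s.1 ++ [((0 : Int), j)], pvSetB s.2 0 j) else s)
          ([], List.replicate n.toNat (List.replicate m.toNat false))).2 c.1 c.2 = true := by
    intro c hc
    rcases O1 c hc with hq | ⟨hc0, hcm, hcg, hcb⟩
    · simp at hq
    · obtain ⟨hj0, hj1⟩ := (PySem.List.mem_pyRange_one).mp hcm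
      refine ⟨⟨by omega, by omega, hj0, hj1⟩, ?_, hcb⟩
      rw [hc0] at hcb ⊢
      exact PvReach.seed c.2 hj0 hj1 hcg
  refine ⟨hmemgood, ?_, ?_, ?_⟩
  · intro p r hin ht
    rcases O4 p r hin.1 hin.2.2.1 ht with hv | hf
    · rw [pvGetB_replicate n m p r hin] at hv; simp at hv
    · have := hmemgood (p, r) hf
      exact this.2.1
  · intro j h0 h1 hg
    exact O5 j ((PySem.List.mem_pyRange_one).mpr ⟨h0, by omega⟩) hg
  · intro p r hin ht
    rcases O4 p r hin.1 hin.2.2.1 ht with hv | hf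
    · rw [pvGetB_replicate n m p r hin] at hv; simp at hv
    · exact Or.inl hf

theorem bfs_yes (n m : Int) (grid : List (List Int)) (hn : 1 ≤ n) :
    (bfs n m grid = "YES" ↔ ∃ j : Int, 0 ≤ j ∧ j < m ∧ PvReach n m grid (n - 1) j) := by
  unfold bfs
  exact pvLoop_yes n m grid hn _ (pvInvA_init n m grid hn)

theorem pvLoop_cases (n m : Int) (grid : List (List Int)) :
    ∀ s : List (Int × Int) × List (List Bool),
      pvLoop n m grid s = "YES" ∨ pvLoop n m grid s = "NO" := by
  intro s
  induction s using pvLoop.induct n m grid with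
  | case1 v => rw [pvLoop]; exact Or.inr rfl
  | case2 y rest v => rw [pvLoop]; simp
  | case3 x y rest v hx ih => rw [pvLoop]; simp only [if_neg hx]; exact ih

def pvShape (n m : Int) (r : List (List Bool)) : Prop :=
  r.length = n.toNat ∧ ∀ row ∈ r, row.length = m.toNat

theorem pvShape_init (n m : Int) (grid : List (List Int)) : pvShape n m (pvInit n m grid) := by
  constructor
  · simp [pvInit, PySem.List.length_pyRange_one]
  · intro row hrow
    simp only [pvInit, List.mem_map] at hrow
    obtain ⟨i, _, hrow⟩ := hrow
    rw [← hrow]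
    simp [PySem.List.length_pyRange_one]

theorem pvShape_setB (n m : Int) (r : List (List Bool)) (i j : Int)
    (h : pvShape n m r) : pvShape n m (pvSetB r i j) := by
  obtain ⟨h1, h2⟩ := h
  unfold pvSetB
  by_cases hi : i.toNat < r.length
  · refine ⟨by simpa using h1, ?_⟩
    intro row hrow
    rcases List.mem_or_eq_of_mem_set hrow with hmem | heq
    · exact h2 row hmem
    · rw [heq, List.length_set, List.getD_eq_getElem _ _ hi]
      exact h2 _ (List.getElem_mem hi)
  · rw [List.set_eq_of_length_le (by omega)]
    exact ⟨h1, h2⟩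

theorem pvGetB_init (n m : Int) (grid : List (List Int)) (i j : Int)
    (hin : pvInRange n m i j) :
    pvGetB (pvInit n m grid) i j = ((i == 0) && (pvGetI grid i j == 0)) := by
  obtain ⟨h1, h2, h3, h4⟩ := hin
  unfold pvGetB pvInit
  have hl : i.toNat < ((PySem.List.pyRange 0 n 1).map (fun i =>
      (PySem.List.pyRange 0 m 1).map (fun j => (i == 0) && (pvGetI grid i j == 0)))).length := by
    simp [PySem.List.length_pyRange_one]; omega
  rw [List.getD_eq_getElem _ _ hl, List.getElem_map]
  have hl2 : i.toNat < (PySem.List.pyRange 0 n 1).length := by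
    simp [PySem.List.length_pyRange_one]; omega
  have hidx : (PySem.List.pyRange 0 n 1)[i.toNat] = i := by
    rw [PySem.List.getElem_pyRange_one]
    omega
  rw [hidx]
  have hl3 : j.toNat < ((PySem.List.pyRange 0 m 1).map
      (fun j => (i == 0) && (pvGetI grid i j == 0))).length := by
    simp [PySem.List.length_pyRange_one]; omega
  rw [List.getD_eq_getElem _ _ hl3, List.getElem_map]
  have hl4 : j.toNat < (PySem.List.pyRange 0 m 1).length := by
    simp [PySem.List.length_pyRange_one]; omega
  have hjdx : (PySem.List.pyRange 0 m 1)[j.toNat] = j := by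
    rw [PySem.List.getElem_pyRange_one]
    omega
  rw [hjdx]

theorem pvCells_mem (n m i j : Int) (hin : pvInRange n m i j) : (i, j) ∈ pvCells n m := by
  unfold pvCells
  rw [List.mem_flatMap]
  exact ⟨i, PySem.List.mem_pyRange_one.mpr ⟨hin.1, hin.2.1⟩,
    List.mem_map.mpr ⟨j, PySem.List.mem_pyRange_one.mpr ⟨hin.2.2.1, hin.2.2.2⟩, rfl⟩⟩

theorem pvCells_range (n m : Int) : ∀ c ∈ pvCells n m, pvInRange n m c.1 c.2 := by
  intro c hc
  unfold pvCells at hc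
  rw [List.mem_flatMap] at hc
  obtain ⟨i, hi, hc⟩ := hc
  obtain ⟨j, hj, rfl⟩ := List.mem_map.mp hc
  obtain ⟨hi1, hi2⟩ := PySem.List.mem_pyRange_one.mp hi
  obtain ⟨hj1, hj2⟩ := PySem.List.mem_pyRange_one.mp hj
  exact ⟨hi1, hi2, hj1, hj2⟩

theorem pvCell_pos (n m : Int) (grid : List (List Int)) (s : List (List Bool) × Bool)
    (c : Int × Int)
    (h : pvGetB s.1 c.1 c.2 = false ∧ pvGetI grid c.1 c.2 = 0 ∧ pvNbr n m s.1 c.1 c.2 = true) :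
    pvCell n m grid s c = (pvSetB s.1 c.1 c.2, true) := by
  simp [pvCell, h]

theorem pvCell_neg (n m : Int) (grid : List (List Int)) (s : List (List Bool) × Bool)
    (c : Int × Int)
    (h : ¬(pvGetB s.1 c.1 c.2 = false ∧ pvGetI grid c.1 c.2 = 0 ∧ pvNbr n m s.1 c.1 c.2 = true)) :
    pvCell n m grid s c = s := by
  simp only [pvCell, if_neg h]

theorem pvNbr_sources (n m : Int) (r : List (List Bool)) (i j : Int)
    (hin : pvInRange n m i j) (hnbr : pvNbr n m r i j = true) :
    ∃ a b : Int, pvInRange n m a b ∧ pvGetB r a b = true ∧ pvAdj a b i j := by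
  obtain ⟨h1, h2, h3, h4⟩ := hin
  unfold pvNbr at hnbr
  simp only [Bool.or_eq_true, Bool.and_eq_true, decide_eq_true_eq] at hnbr
  rcases hnbr with ((⟨hb, hg⟩ | ⟨hb, hg⟩) | ⟨hb, hg⟩) | ⟨hb, hg⟩
  · exact ⟨i - 1, j, ⟨by omega, by omega, h3, h4⟩, hg,
      Or.inr (Or.inl ⟨by omega, rfl⟩)⟩
  · exact ⟨i + 1, j, ⟨by omega, hb, h3, h4⟩, hg,
      Or.inl ⟨by omega, rfl⟩⟩
  · exact ⟨i, j - 1, ⟨h1, h2, by omega, by omega⟩, hg,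
      Or.inr (Or.inr (Or.inr ⟨rfl, by omega⟩))⟩
  · exact ⟨i, j + 1, ⟨h1, h2, by omega, hb⟩, hg,
      Or.inr (Or.inr (Or.inl ⟨rfl, by omega⟩))⟩

theorem pvCh_mono (n m : Int) (grid : List (List Int)) (cs : List (Int × Int)) :
    ∀ s : List (List Bool) × Bool, s.2 = true → (cs.foldl (pvCell n m grid) s).2 = true := by
  induction cs with
  | nil => intro s h; exact h
  | cons c cs ih =>
    intro s h
    simp only [List.foldl_cons]
    apply ih
    unfold pvCell
    split
    · rfl
    · exact h

theorem pvPass_spec (n m : Int) (grid : List (List Int)) (cs : List (Int × Int))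
    (hcs : ∀ c ∈ cs, pvInRange n m c.1 c.2) :
    ∀ s : List (List Bool) × Bool,
    (pvShape n m s.1 → pvShape n m (cs.foldl (pvCell n m grid) s).1) ∧
    (∀ p q : Int, pvGetB s.1 p q = true → pvGetB (cs.foldl (pvCell n m grid) s).1 p q = true) ∧
    ((∀ p q : Int, pvInRange n m p q → pvGetB s.1 p q = true → PvReach n m grid p q) →
      (∀ p q : Int, pvInRange n m p q →
        pvGetB (cs.foldl (pvCell n m grid) s).1 p q = true → PvReach n m grid p q)) ∧
    ((cs.foldl (pvCell n m grid) s).2 = false → (cs.foldl (pvCell n m grid) s).1 = s.1 ∧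
      s.2 = false ∧ ∀ c ∈ cs, ¬(pvGetB s.1 c.1 c.2 = false ∧ pvGetI grid c.1 c.2 = 0 ∧
        pvNbr n m s.1 c.1 c.2 = true)) := by
  induction cs with
  | nil =>
    intro s
    exact ⟨fun h => h, fun p q h => h, fun h => h,
      fun _ => ⟨rfl, by rcases s with ⟨r, b⟩; cases b <;> simp_all, fun c hc => absurd hc (List.not_mem_nil)⟩⟩
  | cons c cs ih =>
    intro s
    have hcin : pvInRange n m c.1 c.2 := hcs c List.mem_cons_self
    have hcs' : ∀ c' ∈ cs, pvInRange n m c'.1 c'.2 := fun c' hc' => hcs c' (List.mem_cons_of_mem c hc')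
    by_cases hg : pvGetB s.1 c.1 c.2 = false ∧ pvGetI grid c.1 c.2 = 0 ∧ pvNbr n m s.1 c.1 c.2 = true
    · have hstep := pvCell_pos n m grid s c hg
      obtain ⟨P1, P2, P3, P4⟩ := (ih hcs') (pvSetB s.1 c.1 c.2, true)
      simp only [List.foldl_cons, hstep]
      refine ⟨?_, ?_, ?_, ?_⟩
      · intro hsh
        exact P1 (pvShape_setB n m s.1 c.1 c.2 hsh)
      · intro p q h
        exact P2 p q (pvGetB_setB_mono s.1 c.1 c.2 p q h)
      · intro hinv
        apply P3
        intro p q hin ht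
        rcases pvGetB_setB_cases s.1 c.1 c.2 p q ht with hold | hnew
        · exact hinv p q hin hold
        · have hpc : p = c.1 ∧ q = c.2 := by
            obtain ⟨ha, hb⟩ := hnew
            obtain ⟨u1, u2, u3, u4⟩ := hin
            obtain ⟨w1, w2, w3, w4⟩ := hcin
            constructor <;> omega
          rw [hpc.1, hpc.2]
          obtain ⟨a, b, hab, habt, habadj⟩ := pvNbr_sources n m s.1 c.1 c.2 hcin hg.2.2
          exact PvReach.step a b c.1 c.2 (hinv a b hab habt) habadj hcin hg.2.1
      · intro hfalse
        exfalso
        have := pvCh_mono n m grid cs (pvSetB s.1 c.1 c.2, true) rfl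
        rw [this] at hfalse
        simp at hfalse
    · have hstep := pvCell_neg n m grid s c hg
      obtain ⟨P1, P2, P3, P4⟩ := (ih hcs') s
      simp only [List.foldl_cons, hstep]
      refine ⟨P1, P2, P3, ?_⟩
      intro hfalse
      obtain ⟨e1, e2, e3⟩ := P4 hfalse
      refine ⟨e1, e2, ?_⟩
      intro c' hc'
      rcases List.mem_cons.mp hc' with rfl | hc'
      · exact hg
      · exact e3 c' hc'

theorem pvPassLoop_spec (n m : Int) (grid : List (List Int)) :
    ∀ r : List (List Bool), pvShape n m r →
      (∀ p q : Int, pvInRange n m p q → pvGetB r p q = true → PvReach n m grid p q) →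
      (pvShape n m (pvPassLoop n m grid r) ∧
       (∀ p q : Int, pvGetB r p q = true → pvGetB (pvPassLoop n m grid r) p q = true) ∧
       (∀ p q : Int, pvInRange n m p q → pvGetB (pvPassLoop n m grid r) p q = true →
          PvReach n m grid p q) ∧
       (∀ p q : Int, pvInRange n m p q → pvGetI grid p q = 0 →
          pvNbr n m (pvPassLoop n m grid r) p q = true →
          pvGetB (pvPassLoop n m grid r) p q = true)) := by
  suffices H : ∀ (k : Nat) (r : List (List Bool)), pvFalseCount r < k → pvShape n m r →
      (∀ p q : Int, pvInRange n m p q → pvGetB r p q = true → PvReach n m grid p q) →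
      (pvShape n m (pvPassLoop n m grid r) ∧
       (∀ p q : Int, pvGetB r p q = true → pvGetB (pvPassLoop n m grid r) p q = true) ∧
       (∀ p q : Int, pvInRange n m p q → pvGetB (pvPassLoop n m grid r) p q = true →
          PvReach n m grid p q) ∧
       (∀ p q : Int, pvInRange n m p q → pvGetI grid p q = 0 →
          pvNbr n m (pvPassLoop n m grid r) p q = true →
          pvGetB (pvPassLoop n m grid r) p q = true)) by
    intro r hsh hinv
    exact H (pvFalseCount r + 1) r (by omega) hsh hinv
  intro k
  induction k with
  | zero => intro r hk; omega
  | succ k ih =>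
    intro r hk hsh hinv
    obtain ⟨P1, P2, P3, P4⟩ := pvPass_spec n m grid (pvCells n m) (pvCells_range n m) (r, false)
    rw [pvPassLoop]
    split
    · rename_i hs
      have hlt : pvFalseCount (List.foldl (pvCell n m grid) (r, false) (pvCells n m)).1 <
          pvFalseCount r := by
        have hfc := pvPass_fc n m grid (pvCells n m) (r, false)
        dsimp only at hfc
        rcases hfc.2 with h2 | h2
        · rw [hs] at h2; simp at h2
        · exact h2
      obtain ⟨Q1, Q2, Q3, Q4⟩ := ih _ (by omega) (P1 hsh) (P3 hinv)
      exact ⟨Q1, fun p q h => Q2 p q (P2 p q h), Q3, Q4⟩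
    · rename_i hs
      have hfalse : (List.foldl (pvCell n m grid) (r, false) (pvCells n m)).2 = false := by
        rcases Bool.eq_false_or_eq_true (List.foldl (pvCell n m grid) (r, false) (pvCells n m)).2
          with ht | hf
        · exact absurd ht hs
        · exact hf
      obtain ⟨e1, _, e3⟩ := P4 hfalse
      rw [e1]
      refine ⟨hsh, fun p q h => h, hinv, ?_⟩
      intro p q hin hg hnbr
      have hguard := e3 (p, q) (pvCells_mem n m p q hin)
      rcases Bool.eq_false_or_eq_true (pvGetB r p q) with ht | hf
      · exact ht
      · exact absurd ⟨hf, hg, hnbr⟩ hguard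

theorem pvReachB_subset (n m : Int) (grid : List (List Int)) (hn : 1 ≤ n)
    (t : List (List Bool))
    (hseed : ∀ j : Int, 0 ≤ j → j < m → pvGetI grid 0 j = 0 → pvGetB t 0 j = true)
    (hclosed : ∀ p q : Int, pvInRange n m p q → pvGetI grid p q = 0 →
      pvNbr n m t p q = true → pvGetB t p q = true) :
    ∀ x y : Int, PvReach n m grid x y → pvGetB t x y = true := by
  intro x y h
  induction h with
  | seed j h0 h1 hg => exact hseed j h0 h1 hg
  | step a b a' b' hr hadj hin hg ih =>
    apply hclosed a' b' hin hg
    obtain ⟨ha1, ha2, ha3, ha4⟩ := pvReach_range n m grid hn a b hr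
    unfold pvNbr
    simp only [Bool.or_eq_true, Bool.and_eq_true, decide_eq_true_eq]
    rcases hadj with ⟨hx, hy⟩ | ⟨hx, hy⟩ | ⟨hx, hy⟩ | ⟨hx, hy⟩
    · -- a' = a - 1 : parent below is (a' + 1, b') = (a, b)
      refine Or.inl (Or.inl (Or.inr ⟨by omega, ?_⟩))
      rw [show a' + 1 = a by omega, hy]
      exact ih
    · refine Or.inl (Or.inl (Or.inl ⟨by omega, ?_⟩))
      rw [show a' - 1 = a by omega, hy]
      exact ih
    · refine Or.inr ⟨by omega, ?_⟩
      rw [hx, show b' + 1 = b by omega]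
      exact ih
    · refine Or.inl (Or.inr ⟨by omega, ?_⟩)
      rw [hx, show b' - 1 = b by omega]
      exact ih

theorem pvRow_any (n m : Int) (t : List (List Bool)) (hn : 1 ≤ n) (hm : 1 ≤ m)
    (hshape : pvShape n m t) :
    ((t.getD (n - 1).toNat []).any (fun b => b) = true ↔
      ∃ j : Int, 0 ≤ j ∧ j < m ∧ pvGetB t (n - 1) j = true) := by
  obtain ⟨hlen, hrows⟩ := hshape
  have hidx : (n - 1).toNat < t.length := by omega
  have hrow : t.getD (n - 1).toNat [] = t[(n - 1).toNat] := List.getD_eq_getElem t [] hidx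
  have hrlen : t[(n - 1).toNat].length = m.toNat := hrows _ (List.getElem_mem hidx)
  rw [hrow]
  constructor
  · intro h
    obtain ⟨b, hb, hbt⟩ := List.any_eq_true.mp h
    obtain ⟨k, hk, hkb⟩ := List.mem_iff_getElem.mp hb
    refine ⟨(k : Int), by omega, by omega, ?_⟩
    unfold pvGetB
    rw [List.getD_eq_getElem t [] (by simpa using hidx), List.getD_eq_getElem _ _ (by simpa using hk)]
    simp only [Int.toNat_natCast]
    rw [hkb]
    exact hbt
  · rintro ⟨j, h0, h1, hj⟩
    unfold pvGetB at hj
    rw [List.getD_eq_getElem t [] hidx] at hj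
    have hjlt : j.toNat < t[(n - 1).toNat].length := by omega
    rw [List.getD_eq_getElem _ _ hjlt] at hj
    exact List.any_eq_true.mpr ⟨true, by rw [← hj]; exact List.getElem_mem hjlt, rfl⟩

theorem bfs_alt_yes (n m : Int) (grid : List (List Int)) (hn : 1 ≤ n) (hm : 1 ≤ m) :
    (bfs_alt n m grid = "YES" ↔ ∃ j : Int, 0 ≤ j ∧ j < m ∧ PvReach n m grid (n - 1) j) := by
  unfold bfs_alt
  rw [if_neg (by omega : ¬(n ≤ 0 ∨ m ≤ 0))]
  have hinv0 : ∀ p q : Int, pvInRange n m p q → pvGetB (pvInit n m grid) p q = true →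
      PvReach n m grid p q := by
    intro p q hin ht
    rw [pvGetB_init n m grid p q hin] at ht
    simp only [Bool.and_eq_true, beq_iff_eq] at ht
    rw [ht.1]
    rw [ht.1] at ht
    exact PvReach.seed q hin.2.2.1 hin.2.2.2 ht.2
  obtain ⟨S, M, I, C⟩ := pvPassLoop_spec n m grid (pvInit n m grid)
    (pvShape_init n m grid) hinv0
  have hseed : ∀ j : Int, 0 ≤ j → j < m → pvGetI grid 0 j = 0 →
      pvGetB (pvPassLoop n m grid (pvInit n m grid)) 0 j = true := by
    intro j h0 h1 hg
    apply M
    rw [pvGetB_init n m grid 0 j ⟨le_refl 0, by omega, h0, h1⟩]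
    simp [hg]
  constructor
  · intro h
    split at h
    · rename_i hany
      obtain ⟨j, h0, h1, hj⟩ := (pvRow_any n m _ hn hm S).mp hany
      exact ⟨j, h0, h1, I (n - 1) j ⟨by omega, by omega, h0, h1⟩ hj⟩
    · simp at h
  · rintro ⟨j, h0, h1, hr⟩
    have := pvReachB_subset n m grid hn _ hseed C (n - 1) j hr
    rw [if_pos ((pvRow_any n m _ hn hm S).mpr ⟨j, h0, h1, this⟩)]

theorem bfs_alt_cases (n m : Int) (grid : List (List Int)) :
    bfs_alt n m grid = "YES" ∨ bfs_alt n m grid = "NO" := by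
  unfold bfs_alt
  split
  · exact Or.inr rfl
  · split
    · exact Or.inl rfl
    · exact Or.inr rfl

theorem bfs_m_nonpos (n m : Int) (grid : List (List Int)) (hm : m ≤ 0) :
    bfs n m grid = "NO" := by
  unfold bfs
  rw [PySem.List.pyRange_one_eq_nil (by omega)]
  simp only [List.foldl_nil]
  rw [pvLoop]

theorem pvSeed_none (grid : List (List Int)) :
    ∀ (js : List Int), (∀ j ∈ js, pvGetI grid 0 j ≠ 0) →
      ∀ s : List (Int × Int) × List (List Bool),
      js.foldl (fun s j =>
        if pvGetI grid 0 j = 0 then (s.1 ++ [((0 : Int), j)], pvSetB s.2 0 j) else s) s = s := by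
  intro js
  induction js with
  | nil => intro _ s; rfl
  | cons j js ih =>
    intro hjs s
    simp only [List.foldl_cons, if_neg (hjs j List.mem_cons_self)]
    exact ih (fun j' hj' => hjs j' (List.mem_cons_of_mem j hj')) s

theorem bfs_blocked_top (n m : Int) (grid : List (List Int)) (hm : 1 ≤ m)
    (hlen : m.toNat ≤ (grid.getD 0 []).length)
    (hnz : ∀ x ∈ (grid.getD 0 []).take m.toNat, ¬x = 0) :
    bfs n m grid = "NO" := by
  unfold bfs
  rw [pvSeed_none grid (PySem.List.pyRange 0 m 1) ?_ _]
  · rw [pvLoop]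
  · intro j hj
    obtain ⟨hj0, hj1⟩ := PySem.List.mem_pyRange_one.mp hj
    have hjlt : j.toNat < (grid.getD 0 []).length := by omega
    unfold pvGetI
    rw [show (0 : Int).toNat = 0 from rfl]
    rw [List.getD_eq_getElem _ _ hjlt]
    have hmem : (grid.getD 0 [])[j.toNat] ∈ (grid.getD 0 []).take m.toNat := by
      have hlt : j.toNat < ((grid.getD 0 []).take m.toNat).length := by
        rw [List.length_take]; omega
      have := List.getElem_take (xs := grid.getD 0 []) (h := hlt)
      rw [← this]
      exact List.getElem_mem hlt
    exact hnz _ hmem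

theorem bfs_main (n m : Int) (grid : List (List Int)) (hpre : Pre_bfs n m grid) :
    bfs n m grid = bfs_alt n m grid := by
  by_cases hm : m ≤ 0
  · rw [bfs_m_nonpos n m grid hm]
    unfold bfs_alt
    rw [if_pos (Or.inr hm)]
  · rcases hpre with h | h | h
    · omega
    · have hm1 : (1 : Int) ≤ m := by omega
      have hn : (1 : Int) ≤ n := h.1
      have hiff := (bfs_yes n m grid hn).trans (bfs_alt_yes n m grid hn hm1).symm
      have ha : bfs n m grid = "YES" ∨ bfs n m grid = "NO" := by
        unfold bfs; exact pvLoop_cases n m grid _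
      rcases ha with ha | ha <;> rcases bfs_alt_cases n m grid with hb | hb
      · rw [ha, hb]
      · exact absurd (hiff.mp ha) (by rw [hb]; simp)
      · exact absurd (hiff.mpr (by rw [hb])) (by rw [ha]; simp)
      · rw [ha, hb]
    · rw [bfs_blocked_top n m grid h.2.1 h.2.2.1 h.2.2.2]
      unfold bfs_alt
      rw [if_pos (Or.inl h.1)]

-- ===== VERDICT (by name: the statement is the Claim_ definition above) =====
theorem bfs_spec : Claim_equal_bfs := by
  intro n m grid _hdom hpre
  unfold Spec_bfs
  exact bfs_main n m grid hpre
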